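-- pv_equiv track=rewrite | github.com/mvereshchagin/MO1MapReduce | multi.py | shuffler
-- ===== SOURCE A (Python) =====
-- from typing import Tuple, Dict, List, Iterator
--
-- def shuffler(mapped_words: List[Tuple[str, int]]) -> Iterator[Tuple[str, List[int]]]:
--     new_words = sorted(mapped_words)
--
--     buffer = []
--     prev_word = None
--     for word, value in new_words:
--         if prev_word == word:
--             buffer.append(value)
--         else:
--             if prev_word is not None:
--                 yield prev_word, buffer
--             buffer = [value]
--         prev_word = word
--
--     if buffer:
--         yield prev_word, buffer
-- ===== SOURCE B (Python) =====
-- from typing import Tuple, List, Iterator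
--
-- def shuffler(mapped_words: List[Tuple[str, int]]) -> Iterator[Tuple[str, List[int]]]:
--     groups = {}
--     for word, value in mapped_words:
--         groups.setdefault(word, []).append(value)
--     for word in sorted(groups):
--         yield word, sorted(groups[word])
-- ===== Notes on version B (the rewrite author's own statement) =====
-- stated objective: alternative
-- what changed: Replaces A's sort-all-pairs-then-stream-group single pass (prev_word/buffer state machine) with two phases: hash-group values per word in one appending loop, then emit sorted keys with sorted buckets.
import Mathlib
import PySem

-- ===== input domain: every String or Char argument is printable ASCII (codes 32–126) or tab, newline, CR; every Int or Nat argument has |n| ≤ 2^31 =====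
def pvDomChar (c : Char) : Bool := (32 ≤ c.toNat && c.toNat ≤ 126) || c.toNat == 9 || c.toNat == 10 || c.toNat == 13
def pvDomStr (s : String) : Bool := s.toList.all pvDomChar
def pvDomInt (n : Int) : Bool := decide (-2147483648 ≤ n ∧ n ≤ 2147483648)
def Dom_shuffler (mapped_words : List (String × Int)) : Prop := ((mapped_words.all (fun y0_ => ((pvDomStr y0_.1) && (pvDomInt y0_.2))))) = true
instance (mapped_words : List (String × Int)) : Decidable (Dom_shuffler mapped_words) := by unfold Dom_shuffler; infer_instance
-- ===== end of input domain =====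

-- B replaces A's sort-all-pairs-then-stream-group pass with hash-grouping into a dict,
-- then emitting sorted keys with sorted value buckets (objective: alternative; same asymptotic cost).


-- ===== PORT A =====
-- the loop body: state (out, buffer, prev_word); branches in Python's order
def shufflerStep (st : List (String × List Int) × List Int × Option String) (p : String × Int) :
    List (String × List Int) × List Int × Option String :=
  match st, p with
  | (out, buffer, prevWord), (word, value) =>
    if prevWord = some word then (out, buffer ++ [value], prevWord)
    else
      match prevWord with
      | some pw => (out ++ [(pw, buffer)], [value], some word)
      | none    => (out, [value], some word)

def shuffler (mapped_words : List (String × Int)) : List (String × List Int) :=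
  let new_words := PySem.List.sorted2 mapped_words Prod.fst Prod.snd
  let st := new_words.foldl shufflerStep ([], [], none)
  -- 'if buffer: yield prev_word, buffer' — prev_word is some whenever buffer ≠ [], so getD "" is never read
  if st.2.1 = [] then st.1 else st.1 ++ [(st.2.2.getD "", st.2.1)]

-- ===== PORT B =====
def shuffler_alt (mapped_words : List (String × Int)) : List (String × List Int) :=
  let groups : PySem.Dict String (List Int) :=
    mapped_words.foldl (fun d p => d.modify p.1 [] (fun vs => vs ++ [p.2])) PySem.Dict.empty
  (PySem.List.sorted groups.keys (fun w => w)).map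
    (fun w => (w, PySem.List.sorted (groups.getD w []) (fun v => v)))

-- ===== PRECONDITION & SPEC =====
def Spec_shuffler (mapped_words : List (String × Int)) (out : List (String × List Int)) : Prop := out = shuffler_alt mapped_words
instance (mapped_words : List (String × Int)) (out : List (String × List Int)) : Decidable (Spec_shuffler mapped_words out) := by unfold Spec_shuffler; infer_instance

-- ===== CLAIM (what is proved, stated in full; the proofs are below) =====
def Claim_equal_shuffler : Prop := ∀ (mapped_words : List (String × Int)), Dom_shuffler mapped_words → Spec_shuffler mapped_words (shuffler mapped_words)

-- ===== LEMMAS AND PROOFS =====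

-- Python's lexicographic order on (str, int) pairs
def lexLt (a b : String × Int) : Prop := a.1 < b.1 ∨ (a.1 = b.1 ∧ a.2 < b.2)
def lexLe (a b : String × Int) : Prop := a.1 < b.1 ∨ (a.1 = b.1 ∧ a.2 ≤ b.2)

-- the comparator sorted2 builds internally
def bf (a b : String × Int) : Bool := decide (a.1 < b.1) || (!decide (b.1 < a.1) && decide (a.2 < b.2))

lemma bf_true_iff (a b : String × Int) : bf a b = true ↔ lexLt a b := by
  rcases lt_trichotomy a.1 b.1 with h | h | h
  · simp [bf, lexLt, h, not_lt_of_gt h]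
  · simp [bf, lexLt, h]
  · simp [bf, lexLt, h, h.ne', not_lt_of_gt h]

lemma bf_false_iff (a b : String × Int) : bf b a = false ↔ lexLe a b := by
  rcases lt_trichotomy a.1 b.1 with h | h | h
  · simp [bf, lexLe, h, not_lt_of_gt h]
  · simp [bf, lexLe, h]
  · simp [bf, lexLe, h, h.ne', not_lt_of_gt h]

lemma lexLt_le (a b : String × Int) (h : lexLt a b) : lexLe a b := by
  rcases h with h | ⟨h1, h2⟩
  · exact Or.inl h
  · exact Or.inr ⟨h1, le_of_lt h2⟩

lemma lexLt_le_trans (a b c : String × Int) (h1 : lexLt a b) (h2 : lexLe b c) : lexLe a c := by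
  rcases h1 with h1 | ⟨h1, h1'⟩ <;> rcases h2 with h2 | ⟨h2, h2'⟩
  · exact Or.inl (lt_trans h1 h2)
  · exact Or.inl (h2 ▸ h1)
  · exact Or.inl (h1 ▸ h2)
  · exact Or.inr ⟨h1.trans h2, le_of_lt (lt_of_lt_of_le h1' h2')⟩

lemma lexLe_antisymm (a b : String × Int) (h1 : lexLe a b) (h2 : lexLe b a) : a = b := by
  rcases h1 with h1 | ⟨h1, h1'⟩ <;> rcases h2 with h2 | ⟨h2, h2'⟩
  · exact absurd h2 (not_lt_of_gt h1)
  · exact absurd h1 (h2 ▸ lt_irrefl _)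
  · exact absurd h2 (h1 ▸ lt_irrefl _)
  · exact Prod.ext h1 (le_antisymm h1' h2')

lemma insertBy_eq_nil (x : String × Int) : PySem.List.insertBy bf x [] = [x] := by
  simp [PySem.List.insertBy]

lemma insertBy_eq_cons (x y : String × Int) (ys : List (String × Int)) :
    PySem.List.insertBy bf x (y :: ys)
      = if bf x y then x :: y :: ys else y :: PySem.List.insertBy bf x ys := by
  simp [PySem.List.insertBy]

lemma pairwise_insertBy (x : String × Int) (ys : List (String × Int))
    (h : ys.Pairwise lexLe) : (PySem.List.insertBy bf x ys).Pairwise lexLe := by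
  induction ys with
  | nil => simp [insertBy_eq_nil]
  | cons y ys ih =>
    rw [insertBy_eq_cons]
    rcases List.pairwise_cons.mp h with ⟨hy, hys⟩
    by_cases hb : bf x y = true
    · rw [if_pos hb]
      have hxy : lexLt x y := (bf_true_iff x y).mp hb
      refine List.pairwise_cons.mpr ⟨?_, h⟩
      intro z hz
      rcases List.mem_cons.mp hz with rfl | hz
      · exact lexLt_le _ _ hxy
      · exact lexLt_le_trans _ _ _ hxy (hy z hz)
    · rw [if_neg hb]
      refine List.pairwise_cons.mpr ⟨?_, ih hys⟩
      intro z hz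
      rcases (PySem.List.mem_insertBy bf x z ys).mp hz with rfl | hz
      · exact (bf_false_iff y z).mp (Bool.not_eq_true _ ▸ hb)
      · exact hy z hz

lemma foldl_insertBy_pairwise (l acc : List (String × Int)) (h : acc.Pairwise lexLe) :
    (l.foldl (fun acc x => PySem.List.insertBy bf x acc) acc).Pairwise lexLe := by
  induction l generalizing acc with
  | nil => exact h
  | cons p l ih => exact ih _ (pairwise_insertBy p acc h)

lemma sorted2_eq_foldl (l : List (String × Int)) :
    PySem.List.sorted2 l Prod.fst Prod.snd
      = l.foldl (fun acc x => PySem.List.insertBy bf x acc) [] := rfl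

lemma sorted2_pairwise (l : List (String × Int)) :
    (PySem.List.sorted2 l Prod.fst Prod.snd).Pairwise lexLe := by
  rw [sorted2_eq_foldl]
  exact foldl_insertBy_pairwise l [] (List.Pairwise.nil)

-- canonical description shared by both sides
def keysOf (l : List (String × Int)) : List String :=
  PySem.List.sorted (PySem.Set.ofList (l.map Prod.fst)) (fun w => w)

def valsOf (l : List (String × Int)) (w : String) : List Int :=
  PySem.List.sorted ((l.filter (fun p => p.1 == w)).map Prod.snd) (fun v => v)

def canon (l : List (String × Int)) : List (String × List Int) :=
  (keysOf l).map (fun w => (w, valsOf l w))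

def chunk (g : String × List Int) : List (String × Int) := g.2.map (fun v => (g.1, v))

def flat (l : List (String × Int)) : List (String × Int) := ((canon l).map chunk).flatten

-- ===== B = canon =====
lemma alt_eq_canon (l : List (String × Int)) : shuffler_alt l = canon l := by
  have hk : (l.foldl (fun d p => d.modify p.1 [] (fun vs => vs ++ [p.2]))
      (PySem.Dict.empty : PySem.Dict String (List Int))).keys
      = PySem.Set.ofList (l.map Prod.fst) := by
    rw [PySem.Dict.keys_foldl_modify_key l Prod.fst [] (fun d x vs => vs ++ [x.2])]
    rfl
  have hg : ∀ w, (l.foldl (fun d p => d.modify p.1 [] (fun vs => vs ++ [p.2]))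
      (PySem.Dict.empty : PySem.Dict String (List Int))).getD w []
      = (l.filter (fun p => p.1 == w)).map Prod.snd := by
    intro w
    rw [PySem.Dict.getD_foldl_modify_append]
    rfl
  show (PySem.List.sorted (l.foldl (fun d p => d.modify p.1 [] (fun vs => vs ++ [p.2]))
      (PySem.Dict.empty : PySem.Dict String (List Int))).keys (fun w => w)).map
      (fun w => (w, PySem.List.sorted ((l.foldl (fun d p => d.modify p.1 [] (fun vs => vs ++ [p.2]))
        (PySem.Dict.empty : PySem.Dict String (List Int))).getD w []) (fun v => v))) = canon l
  simp only [hk, hg]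
  rfl

-- ===== flat l is a permutation of l =====
lemma map_pair_filter (l : List (String × Int)) (w : String) :
    ((l.filter (fun p => p.1 == w)).map Prod.snd).map (fun v => (w, v))
      = l.filter (fun p => p.1 == w) := by
  rw [List.map_map]
  have : ∀ p ∈ l.filter (fun p => p.1 == w), ((fun v => (w, v)) ∘ Prod.snd) p = id p := by
    intro p hp
    have := (List.mem_filter.mp hp).2
    simp only [beq_iff_eq] at this
    exact Prod.ext this.symm rfl
  rw [List.map_congr_left this, List.map_id]

lemma sum_map_single (ks : List String) (c : String) (n : Nat) (hnd : ks.Nodup) :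
    (ks.map (fun w => if c = w then n else 0)).sum = if c ∈ ks then n else 0 := by
  induction ks with
  | nil => simp
  | cons k ks ih =>
    rcases List.nodup_cons.mp hnd with ⟨hk, hnd'⟩
    by_cases hc : c = k
    · subst hc
      simp [List.sum_cons, ih hnd', hk]
    · simp [List.sum_cons, hc, ih hnd']

lemma keysOf_nodup (l : List (String × Int)) : (keysOf l).Nodup := by
  exact (PySem.List.sorted_ofList_pairwise_lt (l.map Prod.fst)).nodup

lemma mem_keysOf (l : List (String × Int)) (w : String) :
    w ∈ keysOf l ↔ w ∈ l.map Prod.fst := by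
  rw [keysOf, PySem.List.mem_sorted, PySem.Set.mem_ofList]

lemma flat_perm (l : List (String × Int)) : (flat l).Perm l := by
  unfold flat canon
  rw [List.map_map, ← List.flatMap_def]
  have h1 : ∀ w ∈ keysOf l,
      ((chunk ∘ fun w => (w, valsOf l w)) w).Perm (l.filter (fun p => p.1 == w)) := by
    intro w _
    show (chunk (w, valsOf l w)).Perm _
    unfold chunk valsOf
    calc ((PySem.List.sorted ((l.filter (fun p => p.1 == w)).map Prod.snd) (fun v => v)).map
            (fun v => (w, v))).Perm
          (((l.filter (fun p => p.1 == w)).map Prod.snd).map (fun v => (w, v))) :=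
        (PySem.List.sorted_perm _ _ _).map _
      _ = l.filter (fun p => p.1 == w) := map_pair_filter l w
  refine (List.Perm.flatMap_left (keysOf l) h1).trans ?_
  apply List.perm_iff_count.mpr
  intro p
  rw [List.flatMap_def, List.count_flatten, List.map_map]
  have h2 : ∀ w ∈ keysOf l,
      ((List.count p ∘ fun w => l.filter (fun p => p.1 == w)) w)
        = if p.1 = w then List.count p l else 0 := by
    intro w _
    by_cases hw : p.1 = w
    · simp only [Function.comp_apply, hw, if_true]
      exact List.count_filter (by simp [hw])
    · simp only [Function.comp_apply, if_neg hw]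
      refine List.count_eq_zero.mpr ?_
      intro hmem
      exact hw (by simpa using (List.mem_filter.mp hmem).2)
  rw [List.map_congr_left h2, sum_map_single _ _ _ (keysOf_nodup l)]
  by_cases hp : p.1 ∈ keysOf l
  · rw [if_pos hp]
  · rw [if_neg hp]
    refine (List.count_eq_zero.mpr ?_).symm
    intro hmem
    exact hp ((mem_keysOf l p.1).mpr (List.mem_map_of_mem hmem))

-- ===== flat l is lex-sorted =====
lemma mem_chunk_fst (g : String × List Int) (x : String × Int) (hx : x ∈ chunk g) :
    x.1 = g.1 := by
  rcases List.mem_map.mp hx with ⟨v, _, rfl⟩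
  rfl

lemma flat_pairwise (l : List (String × Int)) : (flat l).Pairwise lexLe := by
  unfold flat
  rw [List.pairwise_flatten]
  constructor
  · intro c hc
    rcases List.mem_map.mp hc with ⟨g, hg, rfl⟩
    rcases List.mem_map.mp hg with ⟨w, _, rfl⟩
    unfold chunk
    rw [List.pairwise_map]
    have hpw : (valsOf l w).Pairwise (fun a b => a ≤ b) := by
      unfold valsOf
      exact PySem.List.sorted_pairwise _ _
    exact hpw.imp (fun hvv' => Or.inr ⟨rfl, hvv'⟩)
  · rw [List.pairwise_map]
    unfold canon
    rw [List.pairwise_map]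
    refine (PySem.List.sorted_ofList_pairwise_lt (l.map Prod.fst)).imp ?_
    intro w1 w2 h12 x hx y hy
    exact Or.inl ((mem_chunk_fst _ _ hx).symm ▸ (mem_chunk_fst _ _ hy).symm ▸ h12)

lemma sorted2_eq_flat (l : List (String × Int)) :
    PySem.List.sorted2 l Prod.fst Prod.snd = flat l := by
  refine List.Perm.eq_of_pairwise (fun a b _ _ hab hba => lexLe_antisymm a b hab hba)
    (sorted2_pairwise l) (flat_pairwise l) ?_
  exact (PySem.List.sorted2_perm l Prod.fst Prod.snd false).trans (flat_perm l).symm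

-- ===== A's fold groups flat l back into canon l =====
lemma fold_run (vs : List Int) (out : List (String × List Int)) (buf : List Int) (w : String) :
    (vs.map (fun v => (w, v))).foldl shufflerStep (out, buf, some w) = (out, buf ++ vs, some w) := by
  induction vs generalizing buf with
  | nil => simp
  | cons v vs ih => simp [shufflerStep, ih (buf ++ [v])]

def finishA (st : List (String × List Int) × List Int × Option String) :
    List (String × List Int) :=
  if st.2.1 = [] then st.1 else st.1 ++ [(st.2.2.getD "", st.2.1)]

lemma shuffler_eq_finish (l : List (String × Int)) :
    shuffler l = finishA ((PySem.List.sorted2 l Prod.fst Prod.snd).foldl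
      shufflerStep ([], [], none)) := rfl

lemma fold_chunks (G : List (String × List Int)) (out : List (String × List Int))
    (buf : List Int) (w : String) (hbuf : buf ≠ []) (hne : ∀ g ∈ G, g.2 ≠ [])
    (hch : List.IsChain (· ≠ ·) (w :: G.map Prod.fst)) :
    finishA (((G.map chunk).flatten).foldl shufflerStep (out, buf, some w))
      = out ++ (w, buf) :: G := by
  induction G generalizing out buf w with
  | nil => simp [finishA, hbuf]
  | cons g G' ih =>
    obtain ⟨w1, vs1⟩ := g
    have hv : vs1 ≠ [] := hne _ List.mem_cons_self
    obtain ⟨v, vr, rfl⟩ := List.exists_cons_of_ne_nil hv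
    rw [List.map_cons] at hch
    have hww1 : w ≠ w1 := by
      rcases List.isChain_cons.mp hch with ⟨h1, _⟩
      exact h1 w1 rfl
    have hch' : List.IsChain (· ≠ ·) (w1 :: G'.map Prod.fst) :=
      (List.isChain_cons.mp hch).2
    have hstep : shufflerStep (out, buf, some w) (w1, v)
        = (out ++ [(w, buf)], [v], some w1) := by
      simp [shufflerStep, hww1]
    have hchunk : chunk (w1, v :: vr) = (w1, v) :: vr.map (fun v => (w1, v)) := rfl
    rw [List.map_cons, List.flatten_cons, List.foldl_append, hchunk, List.foldl_cons,
      hstep, fold_run, List.singleton_append, ih _ _ _ (List.cons_ne_nil v vr)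
        (fun g hg => hne g (List.mem_cons_of_mem _ hg)) hch']
    simp

lemma canon_vals_ne_nil (l : List (String × Int)) (g : String × List Int) (hg : g ∈ canon l) :
    g.2 ≠ [] := by
  rcases List.mem_map.mp hg with ⟨w, hw, rfl⟩
  show valsOf l w ≠ []
  rcases List.mem_map.mp ((mem_keysOf l w).mp hw) with ⟨p, hp, rfl⟩
  unfold valsOf
  rw [Ne, PySem.List.sorted_eq_nil_iff, List.map_eq_nil_iff, List.filter_eq_nil_iff]
  push Not
  exact ⟨p, hp, by simp⟩

lemma canon_fst_chain (l : List (String × Int)) :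
    List.IsChain (· ≠ ·) ((canon l).map Prod.fst) := by
  have : (canon l).map Prod.fst = keysOf l := by
    unfold canon
    rw [List.map_map]
    exact List.map_id _
  rw [this]
  exact ((PySem.List.sorted_ofList_pairwise_lt (l.map Prod.fst)).imp
    (fun h => ne_of_lt h)).isChain

lemma a_eq_canon (l : List (String × Int)) : shuffler l = canon l := by
  rw [shuffler_eq_finish, sorted2_eq_flat]
  rcases hc : canon l with _ | ⟨⟨w0, vs0⟩, G'⟩
  · have : flat l = [] := by unfold flat; rw [hc]; rfl
    rw [this]
    rfl
  · have hv : vs0 ≠ [] := canon_vals_ne_nil l _ (hc ▸ List.mem_cons_self)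
    obtain ⟨v, vr, rfl⟩ := List.exists_cons_of_ne_nil hv
    have hflat : flat l = chunk (w0, v :: vr) ++ ((G'.map chunk)).flatten := by
      unfold flat
      rw [hc, List.map_cons, List.flatten_cons]
    rw [hflat]
    have hchunk : chunk (w0, v :: vr) = (w0, v) :: vr.map (fun v => (w0, v)) := rfl
    have hstep : shufflerStep ([], [], none) (w0, v) = ([], [v], some w0) := by
      simp [shufflerStep]
    have hch : List.IsChain (· ≠ ·) (w0 :: G'.map Prod.fst) := by
      have := canon_fst_chain l
      rw [hc, List.map_cons] at this
      exact this
    have hne : ∀ g ∈ G', g.2 ≠ [] := by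
      intro g hg
      exact canon_vals_ne_nil l g (hc ▸ List.mem_cons_of_mem _ hg)
    rw [List.foldl_append, hchunk, List.foldl_cons, hstep, fold_run, List.singleton_append,
      fold_chunks G' [] (v :: vr) w0 (List.cons_ne_nil v vr) hne hch]
    simp

-- ===== VERDICT (by name: the statement is the Claim_ definition above) =====
theorem shuffler_spec : Claim_equal_shuffler := by
  intro l _
  show shuffler l = shuffler_alt l
  rw [a_eq_canon, alt_eq_canon]
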